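-- pv_equiv track=rewrite | github.com/Akki-Aqib/AI-Case-Study | 01_BFS_Breadth_First_Search.py | bfs_nearest_exit
-- ===== SOURCE A (Python) =====
-- from collections import deque
--
-- def bfs_nearest_exit(graph, start, exits):
--     """
--     BFS to find the NEAREST exit (fewest hops) from 'start'.
--     Explores level by level and stops at the first exit found.
--     """
--     queue   = deque([[start]])
--     visited = set([start])
--
--     while queue:
--         path = queue.popleft()
--         node = path[-1]
--
--         if node in exits:
--             return path, len(path) - 1
--
--         for neighbor in graph.get(node, []):
--             if neighbor not in visited:
--                 visited.add(neighbor)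
--                 queue.append(path + [neighbor])
--
--     return None, -1
-- ===== SOURCE B (Python) =====
-- def bfs_nearest_exit(graph, start, exits):
--     """
--     Level-synchronized BFS with parent pointers: process the frontier a whole
--     level at a time (scan it for an exit, then expand it), and rebuild the one
--     answer path from the parent map only at the end.
--     """
--     exit_set = set(exits)
--     parent = {start: None}
--     level = [start]
--     while level:
--         for node in level:
--             if node in exit_set:
--                 path = []
--                 while node is not None:
--                     path.append(node)
--                     node = parent[node]
--                 path.reverse()
--                 return path, len(path) - 1
--         nxt = []
--         for node in level:
--             for nb in graph.get(node, []):
--                 if nb not in parent: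
--                     parent[nb] = node
--                     nxt.append(nb)
--         level = nxt
--     return None, -1
-- ===== Notes on version B (the rewrite author's own statement) =====
-- stated objective: alternative
-- what changed: A's queue holds complete paths and copies a whole path on every enqueue; B runs a level-synchronized BFS over plain nodes (scan the frontier for an exit, then expand it) with a parent-pointer dict, rebuilding the single answer path once at the end.
import Mathlib
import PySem

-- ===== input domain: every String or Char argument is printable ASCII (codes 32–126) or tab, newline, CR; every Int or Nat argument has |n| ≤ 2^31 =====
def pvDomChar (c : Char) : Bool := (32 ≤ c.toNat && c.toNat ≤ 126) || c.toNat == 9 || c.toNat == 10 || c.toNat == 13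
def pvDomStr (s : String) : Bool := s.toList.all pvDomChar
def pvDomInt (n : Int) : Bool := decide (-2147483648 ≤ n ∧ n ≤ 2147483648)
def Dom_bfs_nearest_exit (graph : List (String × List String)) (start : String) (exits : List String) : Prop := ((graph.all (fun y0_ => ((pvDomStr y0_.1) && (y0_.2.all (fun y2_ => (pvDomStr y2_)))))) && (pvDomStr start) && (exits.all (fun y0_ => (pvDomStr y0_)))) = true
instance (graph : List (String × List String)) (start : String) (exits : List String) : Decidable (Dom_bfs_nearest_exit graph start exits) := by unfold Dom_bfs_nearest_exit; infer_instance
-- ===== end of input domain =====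

-- B replaces A's queue-of-full-paths BFS (every enqueue copies a whole path) by a
-- level-synchronized BFS over plain nodes with a parent-pointer dict, rebuilding the one
-- answer path only at the end; both are total and the equivalence is exact on the whole domain.

-- ===== PORT A =====

-- path[-1]  (queue entries are always nonempty, so the "" default is never used)
def pvLastOf (p : List String) : String := (PySem.List.pyGet? p (-1)).getD ""

-- universe of node names the loop can ever visit (used only for the termination measures)
def pvU (graph : List (String × List String)) (start : String) : List String :=
  PySem.List.dedup (start :: graph.flatMap Prod.snd)

-- number of universe nodes not yet visited (termination measure component of A)
def pvMeas (U : List String) (visited : PySem.Set String) : Nat :=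
  (U.filter (fun x => !(PySem.Set.contains visited x))).length

-- one inner 'for neighbor in graph.get(node, [])' pass of A
def pvStepA (path : List String) (qv : List (List String) × PySem.Set String) (nb : String) :
    List (List String) × PySem.Set String :=
  if PySem.Set.contains qv.2 nb then qv
  else (qv.1 ++ [path ++ [nb]], PySem.Set.add qv.2 nb)

-- generic termination facts about A's visited-guarded fold (used by A's decreasing_by)
theorem pvFoldVis {σ : Type} (vis : σ → PySem.Set String) (upd : σ → String → σ)
    (hvis : ∀ a nb, vis (upd a nb) = PySem.Set.add (vis a) nb)
    (nbrs : List String) (a : σ) :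
    (∀ y ∈ vis a, y ∈ vis (nbrs.foldl (fun a nb => if PySem.Set.contains (vis a) nb then a else upd a nb) a)) ∧
    ((vis (nbrs.foldl (fun a nb => if PySem.Set.contains (vis a) nb then a else upd a nb) a)).length = (vis a).length →
      nbrs.foldl (fun a nb => if PySem.Set.contains (vis a) nb then a else upd a nb) a = a) ∧
    ((vis (nbrs.foldl (fun a nb => if PySem.Set.contains (vis a) nb then a else upd a nb) a)).length ≠ (vis a).length →
      ∃ x ∈ nbrs, x ∉ vis a ∧ x ∈ vis (nbrs.foldl (fun a nb => if PySem.Set.contains (vis a) nb then a else upd a nb) a)) := by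
  induction nbrs generalizing a with
  | nil => exact ⟨fun y hy => hy, fun _ => rfl, fun h => absurd rfl h⟩
  | cons nb t ih =>
    simp only [List.foldl_cons]
    by_cases hc : PySem.Set.contains (vis a) nb = true
    · rw [if_pos hc]
      obtain ⟨m1, m2, m3⟩ := ih a
      exact ⟨m1, m2, fun h => by obtain ⟨x, hx, h1, h2⟩ := m3 h; exact ⟨x, List.mem_cons_of_mem _ hx, h1, h2⟩⟩
    · rw [if_neg hc]
      have hmem : nb ∉ vis a := fun h => hc (by simpa [PySem.Set.contains_iff] using h)
      obtain ⟨m1, m2, m3⟩ := ih (upd a nb)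
      have hv : vis (upd a nb) = vis a ++ [nb] := by
        rw [hvis, PySem.Set.add_of_not_mem hmem]
      have hle : ∀ (l : List String) (b : σ), (vis b).length ≤ (vis (l.foldl (fun a nb => if PySem.Set.contains (vis a) nb then a else upd a nb) b)).length := by
        intro l; induction l with
        | nil => intro b; simp
        | cons z s ihs =>
          intro b; simp only [List.foldl_cons]
          by_cases hz : PySem.Set.contains (vis b) z = true
          · rw [if_pos hz]; exact ihs b
          · rw [if_neg hz]
            have := ihs (upd b z)
            have h2 : (vis (upd b z)).length = (vis b).length + 1 := by
              rw [hvis, PySem.Set.add_of_not_mem (fun h => hz (by simpa [PySem.Set.contains_iff] using h))]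
              simp
            omega
      refine ⟨?_, ?_, ?_⟩
      · intro y hy; exact m1 y (by simp [hv, hy])
      · intro hlen
        have := hle t (upd a nb)
        rw [hv] at this
        simp only [List.length_append, List.length_cons, List.length_nil] at this
        omega
      · intro _
        exact ⟨nb, List.mem_cons_self, hmem, m1 nb (by simp [hv])⟩

theorem pvFilterLe (t : List String) (p q : String → Bool)
    (hw : ∀ a, q a = true → p a = true) :
    (t.filter q).length ≤ (t.filter p).length := by
  induction t with
  | nil => simp
  | cons z s ihs =>
    by_cases hz : q z = true
    · simp [hz, hw z hz]; omega
    · simp at hz; by_cases hp : p z = true <;> simp [hz, hp] <;> omega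

theorem pvFilterLt (U : List String) (p q : String → Bool)
    (hw : ∀ a, q a = true → p a = true) (x : String) (hxU : x ∈ U)
    (hpx : p x = true) (hqx : q x = false) :
    (U.filter q).length < (U.filter p).length := by
  induction U with
  | nil => simp at hxU
  | cons y t ih =>
    rcases List.mem_cons.1 hxU with rfl | hxt
    · have h1 := pvFilterLe t p q hw
      simp [hpx, hqx]; omega
    · have := ih hxt
      by_cases hq : q y = true
      · simp [hq, hw y hq]; omega
      · simp at hq
        by_cases hp : p y = true <;> simp [hq, hp] <;> omega

theorem pvNbrsSubU (graph : List (String × List String)) (start node : String)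
    (x : String) (hx : x ∈ (PySem.Dict.get? (PySem.Dict.mk graph) node).getD []) :
    x ∈ pvU graph start := by
  unfold pvU
  rw [PySem.List.dedup_eq_ofList, PySem.Set.mem_ofList]
  rcases h : PySem.Dict.get? (PySem.Dict.mk graph) node with _ | l
  · rw [h] at hx; simp at hx
  · rw [h] at hx; simp at hx
    unfold PySem.Dict.get? at h
    rcases Option.map_eq_some_iff.1 h with ⟨p, hfind, hp2⟩
    have hmem := List.mem_of_find?_eq_some hfind
    right
    exact List.mem_flatMap.2 ⟨p, hmem, hp2 ▸ hx⟩

theorem pvALoop_dec (graph : List (String × List String)) (start : String)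
    (path : List String) (rest : List (List String)) (visited : PySem.Set String) :
    Prod.Lex (· < ·) (· < ·)
      (pvMeas (pvU graph start)
        (((PySem.Dict.get? (PySem.Dict.mk graph) (pvLastOf path)).getD []).foldl (pvStepA path) (rest, visited)).2,
       (((PySem.Dict.get? (PySem.Dict.mk graph) (pvLastOf path)).getD []).foldl (pvStepA path) (rest, visited)).1.length)
      (pvMeas (pvU graph start) visited, (path :: rest).length) := by
  have hstep : pvStepA path = fun (qv : List (List String) × PySem.Set String) nb =>
      if PySem.Set.contains qv.2 nb then qv else ((fun (qv : List (List String) × PySem.Set String) nb => (qv.1 ++ [path ++ [nb]], PySem.Set.add qv.2 nb)) qv nb) := rfl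
  obtain ⟨m1, m2, m3⟩ := pvFoldVis (σ := List (List String) × PySem.Set String) Prod.snd
    (fun qv nb => (qv.1 ++ [path ++ [nb]], PySem.Set.add qv.2 nb)) (fun _ _ => rfl)
    ((PySem.Dict.get? (PySem.Dict.mk graph) (pvLastOf path)).getD []) (rest, visited)
  rw [hstep]
  by_cases hlen : (Prod.snd (((PySem.Dict.get? (PySem.Dict.mk graph) (pvLastOf path)).getD []).foldl
      (fun qv nb => if PySem.Set.contains qv.2 nb then qv else (qv.1 ++ [path ++ [nb]], PySem.Set.add qv.2 nb)) (rest, visited))).length = visited.length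
  · rw [m2 hlen]
    exact Prod.Lex.right _ (by simp)
  · obtain ⟨x, hxn, hxv, hxr⟩ := m3 hlen
    apply Prod.Lex.left
    unfold pvMeas
    refine pvFilterLt (pvU graph start) _ _ ?_ x (pvNbrsSubU graph start (pvLastOf path) x hxn) ?_ ?_
    · intro a ha
      rw [Bool.not_eq_true'] at ha ⊢
      rw [Bool.eq_false_iff] at ha ⊢
      exact fun h => ha ((PySem.Set.contains_iff _ _).2 (m1 a ((PySem.Set.contains_iff _ _).1 h)))
    · rw [Bool.not_eq_true', Bool.eq_false_iff]
      exact fun h => hxv ((PySem.Set.contains_iff _ _).1 h)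
    · rw [Bool.not_eq_false']
      exact (PySem.Set.contains_iff _ _).2 hxr

-- the 'while queue:' loop of A
def pvALoop (graph : List (String × List String)) (start : String) (exits : List String)
    (queue : List (List String)) (visited : PySem.Set String) : Option (List String) × Int :=
  match queue with
  | [] => (none, -1)
  | path :: rest =>
    let node := pvLastOf path
    if exits.contains node then (some path, (path.length : Int) - 1)
    else
      let qv := ((PySem.Dict.get? (PySem.Dict.mk graph) node).getD []).foldl (pvStepA path) (rest, visited)
      pvALoop graph start exits qv.1 qv.2
termination_by (pvMeas (pvU graph start) visited, queue.length)
decreasing_by exact pvALoop_dec graph start path rest visited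

def bfs_nearest_exit (graph : List (String × List String)) (start : String) (exits : List String) : Option (List String) × Int :=
  pvALoop graph start exits [[start]] (PySem.Set.ofList [start])

-- ===== PORT B =====

-- B's reconstruction loop 'path=[]; while node is not None: path.append(node); node=parent[node]'.
-- The fuel argument (always called with fuel ≥ the chain length) and the 'none' fallback
-- (Python's KeyError, unreachable on the parent maps B builds) only make the recursion total.
def pvTrace (parent : PySem.Dict String (Option String)) : Nat → String → List String
  | 0, n => [n]
  | f + 1, n =>
    match PySem.Dict.get? parent n with
    | some (some v) => n :: pvTrace parent f v
    | _ => [n]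

-- B's innermost 'if nb not in parent: parent[nb] = node; nxt.append(nb)' (state: nxt, parent)
def pvBStep (node : String) (s : List String × PySem.Dict String (Option String)) (nb : String) :
    List String × PySem.Dict String (Option String) :=
  if PySem.Dict.contains s.2 nb then s
  else (s.1 ++ [nb], PySem.Dict.insert s.2 nb (some node))

-- B's 'for nb in graph.get(node, []): …' body of the expansion pass
def pvBExpand (graph : List (String × List String))
    (s : List String × PySem.Dict String (Option String)) (node : String) :
    List String × PySem.Dict String (Option String) :=
  ((PySem.Dict.get? (PySem.Dict.mk graph) node).getD []).foldl (pvBStep node) s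

-- number of universe nodes without a parent entry yet (termination measure component of B)
def pvMeasD (U : List String) (parent : PySem.Dict String (Option String)) : Nat :=
  (U.filter (fun x => !(PySem.Dict.contains parent x))).length

-- facts about one neighbour pass of B: parent keys only grow, and every node appended to
-- nxt is a universe node that was fresh and now has a parent entry
theorem pvBStepFacts (U : List String) (node : String) :
    ∀ (nbrs acc : List String) (parent : PySem.Dict String (Option String)),
      (∀ nb ∈ nbrs, nb ∈ U) →
      (∀ x, parent.contains x = true → (nbrs.foldl (pvBStep node) (acc, parent)).2.contains x = true) ∧
      (∀ x ∈ (nbrs.foldl (pvBStep node) (acc, parent)).1,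
        x ∈ acc ∨ (x ∈ U ∧ parent.contains x = false ∧ (nbrs.foldl (pvBStep node) (acc, parent)).2.contains x = true)) := by
  intro nbrs
  induction nbrs with
  | nil => exact fun acc parent _ => ⟨fun _ h => h, fun x hx => Or.inl hx⟩
  | cons nb t ih =>
    intro acc parent hU
    simp only [List.foldl_cons]
    by_cases hc : PySem.Dict.contains parent nb = true
    · rw [show pvBStep node (acc, parent) nb = (acc, parent) by unfold pvBStep; rw [if_pos hc]]
      exact ih acc parent (fun a ha => hU a (List.mem_cons_of_mem _ ha))
    · rw [show pvBStep node (acc, parent) nb = (acc ++ [nb], parent.insert nb (some node)) by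
        unfold pvBStep; rw [if_neg hc]]
      obtain ⟨m1, m2⟩ := ih (acc ++ [nb]) (parent.insert nb (some node))
        (fun a ha => hU a (List.mem_cons_of_mem _ ha))
      constructor
      · intro x hx
        exact m1 x (by rw [PySem.Dict.contains_insert]; simp [hx])
      · intro x hx
        rcases m2 x hx with hx1 | ⟨hxU, hxf, hxc⟩
        · rcases List.mem_append.1 hx1 with hx2 | hx2
          · exact Or.inl hx2
          · simp at hx2
            subst hx2
            refine Or.inr ⟨hU x List.mem_cons_self, by simpa using hc, ?_⟩
            exact m1 x (PySem.Dict.contains_insert_self _ _ _)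
        · refine Or.inr ⟨hxU, ?_, hxc⟩
          rw [PySem.Dict.contains_insert] at hxf
          simp at hxf
          exact hxf.2
      
-- the same facts for B's whole expansion pass over one level
theorem pvBExpandFacts (graph : List (String × List String)) (start : String) :
    ∀ (level acc : List String) (parent : PySem.Dict String (Option String)),
      (∀ x, parent.contains x = true → (level.foldl (pvBExpand graph) (acc, parent)).2.contains x = true) ∧
      (∀ x ∈ (level.foldl (pvBExpand graph) (acc, parent)).1,
        x ∈ acc ∨ (x ∈ pvU graph start ∧ parent.contains x = false ∧ (level.foldl (pvBExpand graph) (acc, parent)).2.contains x = true)) := by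
  intro level
  induction level with
  | nil => exact fun acc parent => ⟨fun _ h => h, fun x hx => Or.inl hx⟩
  | cons node t ih =>
    intro acc parent
    simp only [List.foldl_cons]
    obtain ⟨f1, f2⟩ := pvBStepFacts (pvU graph start) node
      ((PySem.Dict.get? (PySem.Dict.mk graph) node).getD []) acc parent
      (fun nb hnb => pvNbrsSubU graph start node nb hnb)
    obtain ⟨m1, m2⟩ := ih (pvBExpand graph (acc, parent) node).1 (pvBExpand graph (acc, parent) node).2
    rw [show ((pvBExpand graph (acc, parent) node).1, (pvBExpand graph (acc, parent) node).2) = pvBExpand graph (acc, parent) node from rfl] at m1 m2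
    constructor
    · exact fun x hx => m1 x (f1 x hx)
    · intro x hx
      rcases m2 x hx with hx1 | ⟨hxU, hxf, hxc⟩
      · rcases f2 x hx1 with hx2 | ⟨hxU, hxf, hxc⟩
        · exact Or.inl hx2
        · exact Or.inr ⟨hxU, hxf, m1 x hxc⟩
      · refine Or.inr ⟨hxU, ?_, hxc⟩
        by_contra hpc
        rw [Bool.not_eq_false] at hpc
        have hfx : (pvBExpand graph (acc, parent) node).2.contains x = true := f1 x hpc
        rw [hfx] at hxf
        cases hxf

theorem pvBLoop_dec (graph : List (String × List String)) (start n0 : String)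
    (ltail : List String) (parent : PySem.Dict String (Option String)) :
    Prod.Lex (· < ·) (· < ·)
      (pvMeasD (pvU graph start) (((n0 :: ltail).foldl (pvBExpand graph) ([], parent)).2),
       ((n0 :: ltail).foldl (pvBExpand graph) ([], parent)).1.length)
      (pvMeasD (pvU graph start) parent, (n0 :: ltail).length) := by
  obtain ⟨mono, wit⟩ := pvBExpandFacts graph start (n0 :: ltail) [] parent
  have hw : ∀ a, (!(((n0 :: ltail).foldl (pvBExpand graph) ([], parent)).2.contains a)) = true →
      (!(parent.contains a)) = true := by
    intro a ha
    rw [Bool.not_eq_true'] at ha ⊢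
    rw [Bool.eq_false_iff] at ha ⊢
    exact fun h => ha (mono a h)
  have hle : pvMeasD (pvU graph start) (((n0 :: ltail).foldl (pvBExpand graph) ([], parent)).2) ≤
      pvMeasD (pvU graph start) parent := pvFilterLe _ _ _ hw
  by_cases heq : pvMeasD (pvU graph start) (((n0 :: ltail).foldl (pvBExpand graph) ([], parent)).2) =
      pvMeasD (pvU graph start) parent
  · have hnil : ((n0 :: ltail).foldl (pvBExpand graph) ([], parent)).1 = [] := by
      rcases hres : ((n0 :: ltail).foldl (pvBExpand graph) ([], parent)).1 with _ | ⟨x, xs⟩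
      · rfl
      · exfalso
        rcases wit x (by rw [hres]; exact List.mem_cons_self) with hx | ⟨hxU, hxf, hxc⟩
        · simp at hx
        · have := pvFilterLt (pvU graph start) _ _ hw x hxU (by simp [hxf]) (by rw [Bool.not_eq_false']; exact hxc)
          unfold pvMeasD at heq
          omega
    rw [hnil, heq]
    exact Prod.Lex.right _ (by simp)
  · exact Prod.Lex.left _ _ (lt_of_le_of_ne hle heq)

-- the 'while level:' loop of B: scan the level for an exit, else expand it wholesale
def pvBLoop (graph : List (String × List String)) (start : String) (exits : List String)
    (level : List String) (parent : PySem.Dict String (Option String)) :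
    Option (List String) × Int :=
  match level with
  | [] => (none, -1)
  | n0 :: ltail =>
    match (n0 :: ltail).find? (fun n => PySem.Set.contains (PySem.Set.ofList exits) n) with
    | some node =>
      let path := (pvTrace parent (parent.size + 1) node).reverse
      (some path, (path.length : Int) - 1)
    | none =>
      let s := (n0 :: ltail).foldl (pvBExpand graph) ([], parent)
      pvBLoop graph start exits s.1 s.2
termination_by (pvMeasD (pvU graph start) parent, level.length)
decreasing_by exact pvBLoop_dec graph start n0 ltail parent

def bfs_nearest_exit_alt (graph : List (String × List String)) (start : String) (exits : List String) : Option (List String) × Int :=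
  pvBLoop graph start exits [start] (PySem.Dict.mk [(start, none)])

-- ===== PRECONDITION & SPEC =====
def Spec_bfs_nearest_exit (graph : List (String × List String)) (start : String) (exits : List String) (out : Option (List String) × Int) : Prop := out = bfs_nearest_exit_alt graph start exits
instance (graph : List (String × List String)) (start : String) (exits : List String) (out : Option (List String) × Int) : Decidable (Spec_bfs_nearest_exit graph start exits out) := by unfold Spec_bfs_nearest_exit; infer_instance

-- ===== CLAIM (what is proved, stated in full; the proofs are below) =====
def Claim_equal_bfs_nearest_exit : Prop := ∀ (graph : List (String × List String)) (start : String) (exits : List String), Dom_bfs_nearest_exit graph start exits → Spec_bfs_nearest_exit graph start exits (bfs_nearest_exit graph start exits)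

-- ===== LEMMAS AND PROOFS =====

-- invariant tying one of A's queued paths to B's parent map
def pvInv (parent : PySem.Dict String (Option String)) (visited : PySem.Set String)
    (p : List String) : Prop :=
  p ≠ [] ∧ (∀ x ∈ p, x ∈ visited) ∧ p.length ≤ parent.size ∧
  ∀ f, p.length ≤ f → pvTrace parent f (pvLastOf p) = p.reverse

theorem pvLast_append (path : List String) (nb : String) : pvLastOf (path ++ [nb]) = nb := by
  unfold pvLastOf
  rw [PySem.List.pyGet?_neg_one_append_singleton]
  rfl

theorem pvExitEq (exits : List String) (n : String) :
    PySem.Set.contains (PySem.Set.ofList exits) n = exits.contains n := by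
  rw [Bool.eq_iff_iff]
  rw [PySem.Set.contains_iff, PySem.Set.mem_ofList, List.contains_iff_mem]

-- inserting a key that no chain element mentions leaves the reconstructed chain unchanged
theorem pvTraceInsert (m : String) (w : Option String) (parent : PySem.Dict String (Option String)) :
    ∀ (f : Nat) (n : String), (∀ x ∈ pvTrace parent f n, x ≠ m) →
      pvTrace (parent.insert m w) f n = pvTrace parent f n := by
  intro f
  induction f with
  | zero => intro n _; rfl
  | succ g ih =>
    intro n hx
    have hhead : n ∈ pvTrace parent (g + 1) n := by
      unfold pvTrace
      rcases PySem.Dict.get? parent n with _ | (_ | v) <;> simp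
    have hnm : n ≠ m := hx n hhead
    unfold pvTrace
    rw [PySem.Dict.get?_insert_of_ne parent w hnm]
    rcases hg : PySem.Dict.get? parent n with _ | (_ | v)
    · rfl
    · rfl
    · show n :: pvTrace (parent.insert m w) g v = n :: pvTrace parent g v
      rw [ih v ?_]
      intro x hxv
      apply hx
      unfold pvTrace
      rw [hg]
      exact List.mem_cons_of_mem _ hxv

-- the per-path invariant survives one fresh (neighbour, parent) insertion
theorem pvInvMono (nb : String) (w : Option String) (parent : PySem.Dict String (Option String))
    (visited : PySem.Set String) (p : List String)
    (hp : pvInv parent visited p) (hnb : nb ∉ visited) :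
    pvInv (parent.insert nb w) (PySem.Set.add visited nb) p := by
  obtain ⟨h1, h2, h3, h4⟩ := hp
  refine ⟨h1, fun x hx => (PySem.Set.mem_add visited nb x).2 (Or.inl (h2 x hx)), ?_, ?_⟩
  · rw [PySem.Dict.size_insert]; split <;> omega
  · intro f hf
    rw [pvTraceInsert nb w parent f (pvLastOf p) ?_, h4 f hf]
    rw [h4 f hf]
    intro x hx
    rw [List.mem_reverse] at hx
    exact fun he => hnb (he ▸ h2 x hx)

-- the freshly enqueued path path++[nb] satisfies the invariant under the extended parent map
theorem pvInvNew (nb : String) (parent : PySem.Dict String (Option String))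
    (visited : PySem.Set String) (path : List String)
    (hp : pvInv parent visited path) (hnb : nb ∉ visited)
    (hfresh : parent.contains nb = false) :
    pvInv (parent.insert nb (some (pvLastOf path))) (PySem.Set.add visited nb) (path ++ [nb]) := by
  obtain ⟨h1, h2, h3, h4⟩ := hp
  have hsize : (parent.insert nb (some (pvLastOf path))).size = parent.size + 1 := by
    rw [PySem.Dict.size_insert, if_neg]
    rw [hfresh]; simp
  refine ⟨by simp, ?_, ?_, ?_⟩
  · intro x hx
    rcases List.mem_append.1 hx with hx | hx
    · exact (PySem.Set.mem_add visited nb x).2 (Or.inl (h2 x hx))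
    · simp at hx
      exact (PySem.Set.mem_add visited nb x).2 (Or.inr hx)
  · rw [hsize]; simp; omega
  · intro f hf
    simp only [List.length_append, List.length_cons, List.length_nil] at hf
    rcases f with _ | g
    · omega
    have hg : path.length ≤ g := by omega
    rw [pvLast_append]
    unfold pvTrace
    rw [PySem.Dict.get?_insert_self]
    show nb :: pvTrace (parent.insert nb (some (pvLastOf path))) g (pvLastOf path) = _
    rw [pvTraceInsert nb (some (pvLastOf path)) parent g (pvLastOf path) ?_, h4 g hg]
    · rw [List.reverse_append]
      rfl
    · rw [h4 g hg]
      intro x hx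
      rw [List.mem_reverse] at hx
      exact fun he => hnb (he ▸ h2 x hx)

-- A's neighbour fold only ever appends to the queue component
theorem pvStepA_split (path : List String) :
    ∀ (nbrs : List String) (q : List (List String)) (v : PySem.Set String),
      nbrs.foldl (pvStepA path) (q, v) =
        (q ++ (nbrs.foldl (pvStepA path) ([], v)).1, (nbrs.foldl (pvStepA path) ([], v)).2) := by
  intro nbrs
  induction nbrs with
  | nil => intro q v; simp
  | cons nb t ih =>
    intro q v
    simp only [List.foldl_cons]
    by_cases hc : PySem.Set.contains v nb = true
    · rw [show pvStepA path (q, v) nb = (q, v) by unfold pvStepA; rw [if_pos hc],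
         show pvStepA path ([], v) nb = ([], v) by unfold pvStepA; rw [if_pos hc]]
      exact ih q v
    · rw [show pvStepA path (q, v) nb = (q ++ [path ++ [nb]], PySem.Set.add v nb) by
            unfold pvStepA; rw [if_neg hc],
         show pvStepA path ([], v) nb = ([path ++ [nb]], PySem.Set.add v nb) by
            unfold pvStepA; rw [if_neg hc]; rfl]
      rw [ih (q ++ [path ++ [nb]]) (PySem.Set.add v nb), ih [path ++ [nb]] (PySem.Set.add v nb)]
      simp

-- one whole 'pop p; expand p' round of A, as a function of A's state
def pvAExp (graph : List (String × List String)) (s : List (List String) × PySem.Set String)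
    (p : List String) : List (List String) × PySem.Set String :=
  ((PySem.Dict.get? (PySem.Dict.mk graph) (pvLastOf p)).getD []).foldl (pvStepA p) s

-- A's loop on a queue split as pending ++ acc: either some pending path already ends at an
-- exit (the first one is returned), or A ends up having expanded every pending path in order
theorem pvABlock (graph : List (String × List String)) (start : String) (exits : List String) :
    ∀ (pending acc : List (List String)) (visited : PySem.Set String),
      pvALoop graph start exits (pending ++ acc) visited =
        match pending.find? (fun p => exits.contains (pvLastOf p)) with
        | some p => (some p, (p.length : Int) - 1)
        | none => pvALoop graph start exits (pending.foldl (pvAExp graph) (acc, visited)).1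
            (pending.foldl (pvAExp graph) (acc, visited)).2 := by
  intro pending
  induction pending with
  | nil => intro acc visited; simp
  | cons p rest ih =>
    intro acc visited
    by_cases he : exits.contains (pvLastOf p) = true
    · rw [List.cons_append, pvALoop.eq_def]
      simp only [List.find?_cons, he, if_true]
    · have he' : exits.contains (pvLastOf p) = false := by
        rw [Bool.eq_false_iff]; exact he
      rw [List.cons_append, pvALoop.eq_def]
      simp only [List.find?_cons, he', if_false, Bool.false_eq_true, List.foldl_cons]
      have hsplitA : ((PySem.Dict.get? (PySem.Dict.mk graph) (pvLastOf p)).getD []).foldl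
          (pvStepA p) (rest ++ acc, visited) =
          (rest ++ (pvAExp graph (acc, visited) p).1, (pvAExp graph (acc, visited) p).2) := by
        rw [pvStepA_split p _ (rest ++ acc) visited]
        unfold pvAExp
        rw [pvStepA_split p _ acc visited]
        simp
      rw [hsplitA]
      have := ih (pvAExp graph (acc, visited) p).1 (pvAExp graph (acc, visited) p).2
      rw [Prod.mk.eta] at this
      exact this

-- one neighbour pass keeps A's and B's states in lockstep and preserves all invariants
theorem pvNbrSim (path : List String) :
    ∀ (nbrs : List String) (qA others : List (List String)) (visited : PySem.Set String)
      (parent : PySem.Dict String (Option String)),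
      (∀ x, parent.contains x = PySem.Set.contains visited x) →
      pvInv parent visited path →
      (∀ p ∈ qA, pvInv parent visited p) →
      (∀ p ∈ others, pvInv parent visited p) →
      (nbrs.foldl (pvBStep (pvLastOf path)) (qA.map pvLastOf, parent)).1
          = (nbrs.foldl (pvStepA path) (qA, visited)).1.map pvLastOf ∧
      (∀ x, (nbrs.foldl (pvBStep (pvLastOf path)) (qA.map pvLastOf, parent)).2.contains x
          = PySem.Set.contains (nbrs.foldl (pvStepA path) (qA, visited)).2 x) ∧
      (∀ p ∈ (nbrs.foldl (pvStepA path) (qA, visited)).1,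
          pvInv (nbrs.foldl (pvBStep (pvLastOf path)) (qA.map pvLastOf, parent)).2
                (nbrs.foldl (pvStepA path) (qA, visited)).2 p) ∧
      (∀ p ∈ others,
          pvInv (nbrs.foldl (pvBStep (pvLastOf path)) (qA.map pvLastOf, parent)).2
                (nbrs.foldl (pvStepA path) (qA, visited)).2 p) := by
  intro nbrs
  induction nbrs with
  | nil => intro qA others visited parent hk hp hq ho; exact ⟨rfl, hk, hq, ho⟩
  | cons nb t ih =>
    intro qA others visited parent hk hp hq ho
    simp only [List.foldl_cons]
    by_cases hc : PySem.Set.contains visited nb = true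
    · rw [show pvStepA path (qA, visited) nb = (qA, visited) by unfold pvStepA; rw [if_pos hc],
         show pvBStep (pvLastOf path) (qA.map pvLastOf, parent) nb = (qA.map pvLastOf, parent) by
           unfold pvBStep; rw [if_pos (by rw [hk nb]; exact hc)]]
      exact ih qA others visited parent hk hp hq ho
    · have hnb : nb ∉ visited := fun h => hc ((PySem.Set.contains_iff visited nb).2 h)
      have hfresh : parent.contains nb = false := by
        rw [hk nb, Bool.eq_false_iff]; exact hc
      rw [show pvStepA path (qA, visited) nb = (qA ++ [path ++ [nb]], PySem.Set.add visited nb) by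
            unfold pvStepA; rw [if_neg hc],
         show pvBStep (pvLastOf path) (qA.map pvLastOf, parent) nb
              = (qA.map pvLastOf ++ [nb], parent.insert nb (some (pvLastOf path))) by
            unfold pvBStep; rw [if_neg (by rw [hk nb]; exact hc)]]
      rw [show qA.map pvLastOf ++ [nb] = (qA ++ [path ++ [nb]]).map pvLastOf by
            rw [List.map_append, List.map_cons, List.map_nil, pvLast_append]]
      apply ih (qA ++ [path ++ [nb]]) others (PySem.Set.add visited nb)
        (parent.insert nb (some (pvLastOf path)))
      · intro x
        rw [PySem.Dict.contains_insert, hk x, Bool.eq_iff_iff]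
        simp only [Bool.or_eq_true, beq_iff_eq, PySem.Set.contains_iff, PySem.Set.mem_add]
        tauto
      · exact pvInvMono nb _ parent visited path hp hnb
      · intro p hpm
        rcases List.mem_append.1 hpm with hm | hm
        · exact pvInvMono nb _ parent visited p (hq p hm) hnb
        · simp at hm
          subst hm
          exact pvInvNew nb parent visited path hp hnb hfresh
      · exact fun p hm => pvInvMono nb _ parent visited p (ho p hm) hnb

-- the whole-level expansion passes of A and B stay in lockstep
theorem pvBlockSim (graph : List (String × List String)) :
    ∀ (pending qA : List (List String)) (visited : PySem.Set String)
      (parent : PySem.Dict String (Option String)),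
      (∀ x, parent.contains x = PySem.Set.contains visited x) →
      (∀ p ∈ qA, pvInv parent visited p) →
      (∀ p ∈ pending, pvInv parent visited p) →
      ((pending.map pvLastOf).foldl (pvBExpand graph) (qA.map pvLastOf, parent)).1
          = (pending.foldl (pvAExp graph) (qA, visited)).1.map pvLastOf ∧
      (∀ x, ((pending.map pvLastOf).foldl (pvBExpand graph) (qA.map pvLastOf, parent)).2.contains x
          = PySem.Set.contains (pending.foldl (pvAExp graph) (qA, visited)).2 x) ∧
      (∀ p ∈ (pending.foldl (pvAExp graph) (qA, visited)).1,
          pvInv ((pending.map pvLastOf).foldl (pvBExpand graph) (qA.map pvLastOf, parent)).2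
                (pending.foldl (pvAExp graph) (qA, visited)).2 p) := by
  intro pending
  induction pending with
  | nil => intro qA visited parent hk hq _; exact ⟨rfl, hk, hq⟩
  | cons p rest ih =>
    intro qA visited parent hk hq hpend
    simp only [List.map_cons, List.foldl_cons]
    obtain ⟨e1, e2, e3, e4⟩ := pvNbrSim p ((PySem.Dict.get? (PySem.Dict.mk graph) (pvLastOf p)).getD [])
      qA rest visited parent hk (hpend p List.mem_cons_self) hq
      (fun r hr => hpend r (List.mem_cons_of_mem _ hr))
    have e1' : (pvBExpand graph (qA.map pvLastOf, parent) (pvLastOf p)).1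
        = (pvAExp graph (qA, visited) p).1.map pvLastOf := e1
    have e2' : ∀ x, (pvBExpand graph (qA.map pvLastOf, parent) (pvLastOf p)).2.contains x
        = PySem.Set.contains (pvAExp graph (qA, visited) p).2 x := e2
    have e3' : ∀ q ∈ (pvAExp graph (qA, visited) p).1,
        pvInv (pvBExpand graph (qA.map pvLastOf, parent) (pvLastOf p)).2
              (pvAExp graph (qA, visited) p).2 q := e3
    have e4' : ∀ q ∈ rest,
        pvInv (pvBExpand graph (qA.map pvLastOf, parent) (pvLastOf p)).2
              (pvAExp graph (qA, visited) p).2 q := e4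
    have hBpair : pvBExpand graph (qA.map pvLastOf, parent) (pvLastOf p)
        = ((pvAExp graph (qA, visited) p).1.map pvLastOf,
           (pvBExpand graph (qA.map pvLastOf, parent) (pvLastOf p)).2) := by
      rw [← e1']
    rw [hBpair]
    have := ih (pvAExp graph (qA, visited) p).1 (pvAExp graph (qA, visited) p).2
      (pvBExpand graph (qA.map pvLastOf, parent) (pvLastOf p)).2 e2' e3' e4'
    rw [Prod.mk.eta] at this
    exact this

-- main simulation: A's path queue against B's (level, parent) state
theorem pvMain (graph : List (String × List String)) (start : String) (exits : List String) :
    ∀ (level : List String) (parent : PySem.Dict String (Option String))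
      (paths : List (List String)) (visited : PySem.Set String),
      level = paths.map pvLastOf →
      (∀ x, parent.contains x = PySem.Set.contains visited x) →
      (∀ p ∈ paths, pvInv parent visited p) →
      pvALoop graph start exits paths visited = pvBLoop graph start exits level parent := by
  intro level parent
  induction level, parent using pvBLoop.induct graph start exits with
  | case1 parent =>
    intro paths visited hlevel hk hinv
    have hpaths : paths = [] := by
      rcases paths with _ | ⟨p, t⟩
      · rfl
      · simp at hlevel
    subst hpaths
    rw [pvALoop.eq_def, pvBLoop.eq_def]
  | case2 parent n0 ltail node hfind =>
    intro paths visited hlevel hk hinv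
    have hfind0 := hfind
    rw [hlevel, List.find?_map] at hfind
    simp only [Function.comp_def] at hfind
    rw [show (fun p : List String => PySem.Set.contains (PySem.Set.ofList exits) (pvLastOf p))
        = (fun p : List String => exits.contains (pvLastOf p)) from
        funext fun q => pvExitEq exits (pvLastOf q)] at hfind
    obtain ⟨p, hfp, hplast⟩ := Option.map_eq_some_iff.1 hfind
    obtain ⟨h1, h2, h3, h4⟩ := hinv p (List.mem_of_find?_eq_some hfp)
    have hA := pvABlock graph start exits paths [] visited
    rw [List.append_nil] at hA
    rw [hA, hfp]
    rw [pvBLoop.eq_def]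
    simp only [hfind0]
    have htr : pvTrace parent (parent.size + 1) node = p.reverse := by
      rw [← hplast]
      exact h4 _ (by omega)
    rw [htr, List.reverse_reverse]
  | case3 parent n0 ltail hfind s hs =>
    intro paths visited hlevel hk hinv
    have hfind0 := hfind
    rw [hlevel, List.find?_map] at hfind
    simp only [Function.comp_def] at hfind
    rw [show (fun p : List String => PySem.Set.contains (PySem.Set.ofList exits) (pvLastOf p))
        = (fun p : List String => exits.contains (pvLastOf p)) from
        funext fun q => pvExitEq exits (pvLastOf q)] at hfind
    have hfA : paths.find? (fun p => exits.contains (pvLastOf p)) = none :=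
      Option.map_eq_none_iff.1 hfind
    have hA := pvABlock graph start exits paths [] visited
    rw [List.append_nil] at hA
    rw [hA, hfA]
    rw [pvBLoop.eq_def]
    simp only [hfind0]
    obtain ⟨e1, e2, e3⟩ := pvBlockSim graph paths [] visited parent hk (by simp) hinv
    have e1' : ((n0 :: ltail).foldl (pvBExpand graph) ([], parent)).1
        = (paths.foldl (pvAExp graph) ([], visited)).1.map pvLastOf := by
      rw [hlevel]; exact e1
    have e2' : ∀ x, ((n0 :: ltail).foldl (pvBExpand graph) ([], parent)).2.contains x
        = PySem.Set.contains (paths.foldl (pvAExp graph) ([], visited)).2 x := by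
      rw [hlevel]; exact e2
    have e3' : ∀ p ∈ (paths.foldl (pvAExp graph) ([], visited)).1,
        pvInv ((n0 :: ltail).foldl (pvBExpand graph) ([], parent)).2
              (paths.foldl (pvAExp graph) ([], visited)).2 p := by
      rw [hlevel]; exact e3
    exact hs _ _ e1' e2' e3'

-- ===== VERDICT (by name: the statement is the Claim_ definition above) =====
theorem bfs_nearest_exit_spec : Claim_equal_bfs_nearest_exit := by
  intro graph start exits _
  unfold Spec_bfs_nearest_exit bfs_nearest_exit bfs_nearest_exit_alt
  have hlast : pvLastOf [start] = start := by
    unfold pvLastOf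
    rw [PySem.List.pyGet?_neg_one]
    rfl
  apply pvMain graph start exits [start] (PySem.Dict.mk [(start, none)]) [[start]]
    (PySem.Set.ofList [start])
  · rw [List.map_cons, List.map_nil, hlast]
  · intro x
    rw [Bool.eq_iff_iff]
    simp [PySem.Dict.contains_mk, PySem.Set.ofList, PySem.Set.add, PySem.Set.contains,
      PySem.Set.empty]
    constructor
    · exact fun h => h.symm
    · exact fun h => h.symm
  · intro p hp
    simp only [List.mem_cons, List.not_mem_nil, or_false] at hp
    subst hp
    refine ⟨by simp, ?_, ?_, ?_⟩
    · intro x hx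
      simp only [List.mem_cons, List.not_mem_nil, or_false] at hx
      subst hx
      simp [PySem.Set.ofList]
    · simp [PySem.Dict.size]
    · intro f hf
      simp only [List.length_cons, List.length_nil] at hf
      rcases f with _ | g
      · omega
      rw [hlast]
      simp [pvTrace, PySem.Dict.get?_mk_cons]
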